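-- pv_equiv track=rewrite | github.com/Raspeball/adventofcode | 2023/day1/day1.py | GetModCalibVals
-- ===== SOURCE A (Python) =====
-- def GetModCalibVals(line):
--     # line is a string element of a list
--
--     # reversed string/line
--     rev_line = line[::-1]
--
--     spelled_nums = ["one", "two", "three", "four", "five", "six", "seven", "eight", "nine"]
--
--     # dics that hold the position of spelled numbers in the line
--     # find() returns -1 if a word is not in the string, and thus we don't need these
--     num_pos = {spelled:line.find(spelled) for spelled in spelled_nums if line.find(spelled) != -1}
--     num_pos_reverse = {spelled[::-1]:rev_line.find(spelled[::-1]) for spelled in spelled_nums if rev_line.find(spelled[::-1]) != -1}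
--
--
--     # sorting
--     sorted_num_pos = dict(sorted(num_pos.items(), key=lambda item: item[1]))
--     sorted_num_pos_reverse = dict(sorted(num_pos_reverse.items(), key=lambda item: item[1]))
--
--     low = spelled_nums.index([k for k in sorted_num_pos.keys()][0]) + 1
--     rev_low = spelled_nums.index([k for k in sorted_num_pos_reverse.keys()][0][::-1]) + 1
--
--     return int(str(low) + str(rev_low))
-- ===== SOURCE B (Python) =====
-- def GetModCalibVals(line):
--     # One left-to-right positional scan instead of per-word find / reverse / sort.
--     words = ["one", "two", "three", "four", "five", "six", "seven", "eight", "nine"]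
--     digits = [v
--               for i in range(len(line))
--               for v, w in enumerate(words, 1)
--               if line[i:i + len(w)] == w]
--     return digits[0] * 10 + digits[-1]
-- ===== Notes on version B (the rewrite author's own statement) =====
-- stated objective: simpler
-- what changed: Replaces the per-word find / reversed-string find / dict / stable-sort machinery with a single left-to-right positional scan that collects the value of every spelled-number occurrence in order, then combines the first and last collected value arithmetically.
import Mathlib
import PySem

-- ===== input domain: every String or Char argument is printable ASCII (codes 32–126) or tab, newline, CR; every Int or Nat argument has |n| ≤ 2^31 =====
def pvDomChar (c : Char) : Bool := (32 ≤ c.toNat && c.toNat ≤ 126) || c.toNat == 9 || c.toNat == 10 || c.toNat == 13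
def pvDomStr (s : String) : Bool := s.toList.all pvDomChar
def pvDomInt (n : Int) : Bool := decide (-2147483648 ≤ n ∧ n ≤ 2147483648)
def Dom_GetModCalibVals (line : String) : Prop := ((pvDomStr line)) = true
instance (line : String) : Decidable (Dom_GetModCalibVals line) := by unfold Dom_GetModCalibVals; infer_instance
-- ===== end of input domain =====

-- B replaces A's per-word find / reversed-string find / dict / stable-sort machinery with one
-- left-to-right positional scan collecting every spelled-number occurrence in order (simpler, same cost).

-- ===== PORT A =====
-- spelled_nums (the literal list inside A)
def pvSpelled : List String := ["one", "two", "three", "four", "five", "six", "seven", "eight", "nine"]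

-- rev_line = line[::-1]  (a [::-1] slice never raises)
def pvRevLine (line : String) : String := (PySem.Str.slice? line none none (-1)).getD ""

-- spelled[::-1]
def pvRevWord (w : String) : String := (PySem.Str.slice? w none none (-1)).getD ""

-- num_pos = {spelled: line.find(spelled) for spelled in spelled_nums if line.find(spelled) != -1}
def pvNumPos (line : String) : PySem.Dict String Int :=
  pvSpelled.foldl (fun d spelled =>
    if PySem.Str.find line spelled ≠ -1 then d.insert spelled (PySem.Str.find line spelled) else d)
    PySem.Dict.empty

-- num_pos_reverse = {spelled[::-1]: rev_line.find(spelled[::-1]) for spelled in spelled_nums if ... != -1}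
def pvNumPosRev (line : String) : PySem.Dict String Int :=
  pvSpelled.foldl (fun d spelled =>
    if PySem.Str.find (pvRevLine line) (pvRevWord spelled) ≠ -1 then
      d.insert (pvRevWord spelled) (PySem.Str.find (pvRevLine line) (pvRevWord spelled))
    else d)
    PySem.Dict.empty

-- sorted_num_pos = dict(sorted(num_pos.items(), key=lambda item: item[1]))
def pvSortedNumPos (line : String) : PySem.Dict String Int :=
  PySem.Dict.ofList (PySem.List.sorted (pvNumPos line).items (fun it => it.2) false)

def pvSortedNumPosRev (line : String) : PySem.Dict String Int :=
  PySem.Dict.ofList (PySem.List.sorted (pvNumPosRev line).items (fun it => it.2) false)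

def GetModCalibVals (line : String) : Int :=
  -- low = spelled_nums.index([k for k in sorted_num_pos.keys()][0]) + 1 ; [..][0] raises IndexError on empty
  match PySem.List.pyGet? (pvSortedNumPos line).keys 0, PySem.List.pyGet? (pvSortedNumPosRev line).keys 0 with
  | some k, some kRev =>
    match PySem.List.index? pvSpelled k, PySem.List.index? pvSpelled (pvRevWord kRev) with
    | some lowIdx, some revIdx =>
      -- return int(str(low) + str(rev_low))
      (PySem.Int.ofChars? (PySem.Int.toChars ((lowIdx : Int) + 1) ++ PySem.Int.toChars ((revIdx : Int) + 1))).getD 0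
    | _, _ => 0   -- .index ValueError (unreachable: the key came from spelled_nums)
  | _, _ => 0     -- IndexError (no spelled number in line): excluded by Pre_

-- ===== PORT B =====
-- words (B's own literal list)
def pvWords : List String := ["one", "two", "three", "four", "five", "six", "seven", "eight", "nine"]

-- digits = [v for i in range(len(line)) for v, w in enumerate(words, 1) if line[i:i+len(w)] == w]
def pvDigits (line : String) : List Int :=
  (PySem.List.pyRange 0 (PySem.Str.len line) 1).flatMap (fun i =>
    (PySem.List.enumerate pvWords 1).filterMap (fun vw =>
      -- string slice equality, exact on code points: the slice of .toList compared with w.toList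
      if PySem.List.slice line.toList (some i) (some (i + PySem.Str.len vw.2)) = vw.2.toList
      then some vw.1 else none))

def GetModCalibVals_alt (line : String) : Int :=
  -- return digits[0] * 10 + digits[-1]   (IndexError if digits is empty: excluded by Pre_)
  match PySem.List.pyGet? (pvDigits line) 0 with
  | none => 0
  | some a =>
    match PySem.List.pyGet? (pvDigits line) (-1) with
    | none => 0
    | some b => a * 10 + b

-- ===== PRECONDITION & SPEC =====
-- Pre_ excludes exactly the lines containing no spelled number, on which both Pythons raise IndexError.
def Pre_GetModCalibVals (line : String) : Prop := ∃ w ∈ pvSpelled, PySem.Str.isIn w line = true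
instance (line : String) : Decidable (Pre_GetModCalibVals line) := by unfold Pre_GetModCalibVals; infer_instance
def pvWitness_GetModCalibVals : String := "xtwone3four"

def Spec_GetModCalibVals (line : String) (out : Int) : Prop := out = GetModCalibVals_alt line
instance (line : String) (out : Int) : Decidable (Spec_GetModCalibVals line out) := by unfold Spec_GetModCalibVals; infer_instance

-- ===== CLAIM (what is proved, stated in full; the proofs are below) =====
def Claim_equal_GetModCalibVals : Prop := ∀ (line : String), Dom_GetModCalibVals line → Pre_GetModCalibVals line → Spec_GetModCalibVals line (GetModCalibVals line)

-- ===== LEMMAS AND PROOFS =====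

-- The nine spelled words as char lists
def pvWc : List (List Char) := pvSpelled.map String.toList

lemma pv_len_wc : ∀ w ∈ pvWc, 3 ≤ w.length ∧ w.length ≤ 5 := by decide

-- no spelled word is a prefix of another
lemma pv_prefix_free : ∀ w1 ∈ pvWc, ∀ w2 ∈ pvWc, w1 <+: w2 → w1 = w2 := by decide

-- no spelled word occurs inside another at a positive offset
lemma pv_no_internal : ∀ w1 ∈ pvWc, ∀ w2 ∈ pvWc, ∀ o ∈ ([1, 2, 3, 4] : List Nat),
    ¬ w2 <+: w1.drop o := by decide

-- at most one spelled word starts at a given position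
lemma pv_unique {l : List Char} {i : Nat} {w1 w2 : List Char}
    (h1 : w1 ∈ pvWc) (h2 : w2 ∈ pvWc) (m1 : w1 <+: l.drop i) (m2 : w2 <+: l.drop i) :
    w1 = w2 := by
  rcases Nat.le_total w1.length w2.length with h | h
  · exact pv_prefix_free w1 h1 w2 h2 (List.prefix_of_prefix_length_le m1 m2 h)
  · exact (pv_prefix_free w2 h2 w1 h1 (List.prefix_of_prefix_length_le m2 m1 h)).symm

-- ends of matches are strictly ordered like their starts
lemma pv_ends_lt {l : List Char} {i j : Nat} {w1 w2 : List Char}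
    (h1 : w1 ∈ pvWc) (h2 : w2 ∈ pvWc) (m1 : w1 <+: l.drop i) (m2 : w2 <+: l.drop j)
    (hij : i < j) : i + w1.length < j + w2.length := by
  by_contra hc
  have hl1 := pv_len_wc w1 h1
  have hl2 := pv_len_wc w2 h2
  set o := j - i with ho
  have ho1 : 1 ≤ o := by omega
  have ho4 : o + w2.length ≤ w1.length := by omega
  have e1 := List.prefix_iff_eq_take.mp m1
  have e2 := List.prefix_iff_eq_take.mp m2
  have hdj : l.drop j = (l.drop i).drop o := by rw [List.drop_drop]; congr 1; omega
  have hpre : w2 <+: w1.drop o := by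
    have hw1 : w1.drop o = ((l.drop i).drop o).take (w1.length - o) := by
      conv_lhs => rw [e1]
      rw [List.drop_take]
    rw [List.prefix_iff_eq_take, hw1, List.take_take]
    have hmin : min w2.length (w1.length - o) = w2.length := by omega
    rw [hmin, ← hdj]
    exact e2
  have ho5 : o ≤ 4 := by omega
  interval_cases o <;> exact pv_no_internal w1 h1 w2 h2 _ (by simp) hpre

-- ----- string/char-list bridges -----
lemma pv_revWord_toList (w : String) : (pvRevWord w).toList = w.toList.reverse := by
  rw [pvRevWord, PySem.Str.slice?_none_none_neg_one]; simp

lemma pv_revLine_toList (line : String) : (pvRevLine line).toList = line.toList.reverse := by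
  rw [pvRevLine, PySem.Str.slice?_none_none_neg_one]; simp

lemma pv_revWord_revWord (w : String) : pvRevWord (pvRevWord w) = w := by
  apply String.toList_inj.mp
  rw [pv_revWord_toList, pv_revWord_toList, List.reverse_reverse]

-- find points no later than any occurrence, and an occurrence makes it nonnegative
lemma pv_find_le {s sub : List Char} {i : Nat} (h : sub <+: s.drop i) :
    0 ≤ PySem.Chars.find s sub ∧ PySem.Chars.find s sub ≤ (i : Int) := by
  have hnn : 0 ≤ PySem.Chars.find s sub := by
    rw [PySem.Chars.find_nonneg_iff]
    exact h.isInfix.trans (s.drop_suffix i).isInfix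
  refine ⟨hnn, ?_⟩
  by_contra hlt
  have hi : i < (PySem.Chars.find s sub).toNat := by omega
  exact (PySem.Chars.find_spec hnn).2 i hi h

-- reversed-side occurrence transfer
lemma pv_rev_match_of_match {l w : List Char} {i : Nat} (hw : w ≠ []) (hm : w <+: l.drop i) :
    i + w.length ≤ l.length ∧ w.reverse <+: l.reverse.drop (l.length - i - w.length) := by
  have hwpos : 0 < w.length := List.length_pos_iff.mpr hw
  have hlen : i + w.length ≤ l.length := by
    have h1 := hm.length_le
    rw [List.length_drop] at h1
    omega
  refine ⟨hlen, ?_⟩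
  rw [List.drop_reverse]
  have harith : l.length - (l.length - i - w.length) = i + w.length := by omega
  rw [harith, List.reverse_prefix]
  have e := List.prefix_iff_eq_take.mp hm
  refine ⟨l.take i, ?_⟩
  rw [List.take_add, ← e]

lemma pv_match_of_rev_match {l w : List Char} {p : Nat} (hw : w ≠ [])
    (hm : w.reverse <+: l.reverse.drop p) :
    p + w.length ≤ l.length ∧ w <+: l.drop (l.length - p - w.length) := by
  have hwpos : 0 < w.length := List.length_pos_iff.mpr hw
  have hlen : p + w.length ≤ l.length := by
    have h1 := hm.length_le
    rw [List.length_drop, List.length_reverse, List.length_reverse] at h1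
    omega
  refine ⟨hlen, ?_⟩
  rw [List.drop_reverse, List.reverse_prefix] at hm
  have e := List.suffix_iff_eq_drop.mp hm
  rw [List.length_take] at e
  rw [List.drop_take] at e
  rw [List.prefix_iff_eq_take]
  have harith1 : min (l.length - p) l.length - w.length = l.length - p - w.length := by omega
  rw [harith1] at e
  have harith2 : l.length - p - (l.length - p - w.length) = w.length := by omega
  rw [harith2] at e
  exact e

-- ----- dict-comprehension loop shape -----
lemma pv_items_foldl_if {p : String → Prop} [DecidablePred p] (key : String → String)
    (val : String → Int) (f : PySem.Dict String Int → String → PySem.Dict String Int)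
    (hf : ∀ d w, f d w = if p w then d.insert (key w) (val w) else d)
    (ws : List String) (d : PySem.Dict String Int)
    (hfresh : ∀ w ∈ ws, d.contains (key w) = false) (hnd : (ws.map key).Nodup) :
    (ws.foldl f d).items
      = d.items ++ (ws.filter (fun w => decide (p w))).map (fun w => (key w, val w)) := by
  induction ws generalizing d with
  | nil => simp
  | cons a t ih =>
    simp only [List.foldl_cons, List.filter_cons]
    rw [hf]
    have hnd2 : (key a :: t.map key).Nodup := by rw [List.map_cons] at hnd; exact hnd
    have hka : key a ∉ t.map key := (List.nodup_cons.mp hnd2).1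
    have hndt : (t.map key).Nodup := (List.nodup_cons.mp hnd2).2
    by_cases hp : p a
    · rw [if_pos hp]
      have hfa : d.contains (key a) = false := hfresh a (by simp)
      have hfresh' : ∀ w ∈ t, (d.insert (key a) (val a)).contains (key w) = false := by
        intro w hw
        rw [PySem.Dict.contains_insert]
        have hne : key w ≠ key a := by
          intro hEq
          exact hka (hEq ▸ List.mem_map_of_mem hw)
        simp [hne, hfresh w (List.mem_cons_of_mem _ hw)]
      rw [ih _ hfresh' hndt]
      rw [PySem.Dict.items_insert_of_not_contains _ _ hfa]
      simp [hp]
    · rw [if_neg hp]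
      rw [ih _ (fun w hw => hfresh w (List.mem_cons_of_mem _ hw)) hndt]
      simp [hp]

-- ----- filterMap over the word table -----
lemma pv_filterMap_single {A B : Type} (xs : List A) (p : A → Prop) [DecidablePred p] (g : A → B)
    (x : A) (hx : x ∈ xs) (hp : p x) (huniq : ∀ y ∈ xs, p y → y = x) (hnd : xs.Nodup) :
    xs.filterMap (fun y => if p y then some (g y) else none) = [g x] := by
  induction xs with
  | nil => cases hx
  | cons a t ih =>
    rcases List.mem_cons.mp hx with rfl | hxt
    · have hnt : ∀ y ∈ t, ¬ p y := by
        intro y hy hpy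
        have := huniq y (List.mem_cons_of_mem _ hy) hpy
        exact (List.nodup_cons.mp hnd).1 (this ▸ hy)
      rw [List.filterMap_cons, if_pos hp]
      have : t.filterMap (fun y => if p y then some (g y) else none) = [] := by
        rw [List.filterMap_eq_nil_iff]
        intro y hy
        rw [if_neg (hnt y hy)]
      rw [this]
    · have hpa : ¬ p a := by
        intro hpa
        have := huniq a (List.mem_cons_self) hpa
        exact (List.nodup_cons.mp hnd).1 (this ▸ hxt)
      rw [List.filterMap_cons, if_neg hpa]
      exact ih hxt (fun y hy => huniq y (List.mem_cons_of_mem _ hy)) (List.nodup_cons.mp hnd).2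

lemma pv_filterMap_nil {A B : Type} (xs : List A) (p : A → Prop) [DecidablePred p] (g : A → B)
    (hnone : ∀ y ∈ xs, ¬ p y) :
    xs.filterMap (fun y => if p y then some (g y) else none) = [] := by
  rw [List.filterMap_eq_nil_iff]
  intro y hy
  rw [if_neg (hnone y hy)]

-- ----- flatMap over range: first/last nonempty block -----
lemma pv_flat_head {n i₀ : Nat} {v : Int} {f : Nat → List Int} (hi₀ : i₀ < n)
    (hnil : ∀ k < i₀, f k = []) (hv : f i₀ = [v]) :
    ((List.range n).flatMap f).head? = some v := by
  have hsplit : n = i₀ + (n - i₀ - 1 + 1) := by omega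
  rw [hsplit, List.range_add, List.flatMap_append]
  have h1 : (List.range i₀).flatMap f = [] :=
    List.flatMap_eq_nil_iff.mpr (fun k hk => hnil k (List.mem_range.mp hk))
  rw [h1, List.nil_append, List.range_succ_eq_map, List.map_cons, List.flatMap_cons]
  simp [hv]

lemma pv_flat_last {n i₁ : Nat} {v : Int} {f : Nat → List Int} (hi₁ : i₁ < n)
    (hnil : ∀ k, i₁ < k → k < n → f k = []) (hv : f i₁ = [v]) :
    ((List.range n).flatMap f).getLast? = some v := by
  have hsplit : n = (i₁ + 1) + (n - i₁ - 1) := by omega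
  rw [hsplit, List.range_add, List.flatMap_append]
  have h2 : ((List.range (n - i₁ - 1)).map (fun x => i₁ + 1 + x)).flatMap f = [] := by
    rw [List.flatMap_eq_nil_iff]
    intro k hk
    rw [List.mem_map] at hk
    obtain ⟨x, hx, rfl⟩ := hk
    exact hnil _ (by omega) (by have := List.mem_range.mp hx; omega)
  rw [h2, List.append_nil, List.range_succ, List.flatMap_append, List.flatMap_cons,
    List.flatMap_nil, List.append_nil, hv, List.getLast?_concat]

-- ----- keys of dict(sorted(...)) -----
lemma pv_keys_head (m : String × Int) (t : List (String × Int)) :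
    PySem.List.pyGet? (PySem.Dict.ofList (m :: t)).keys 0 = some m.1 := by
  have hk : (PySem.Dict.ofList (m :: t)).keys = PySem.Set.ofList ((m :: t).map Prod.fst) := by
    simp only [PySem.Dict.ofList, PySem.Dict.update]
    rw [PySem.Dict.keys_foldl_insert_key (m :: t) Prod.fst]
    rw [PySem.Dict.keys_empty, PySem.Set.update_nil_left]
  rw [hk, List.map_cons, PySem.Set.ofList_cons, PySem.List.pyGet?_zero_cons]

-- index of a list element in a nodup list
lemma pv_index_of_getElem {xs : List String} {j : Nat} (hj : j < xs.length) (hnd : xs.Nodup) :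
    PySem.List.index? xs xs[j] = some j := by
  rw [PySem.List.index?_eq_some_iff]
  refine ⟨xs.take j, xs.drop (j + 1), ?_, ?_, ?_⟩
  · rw [List.getElem_cons_drop, List.take_append_drop]
  · rw [List.length_take]; omega
  · intro hmem
    rw [List.mem_take_iff_getElem] at hmem
    obtain ⟨k, hk, hkeq⟩ := hmem
    have hkj : k < j := by omega
    exact absurd (hnd.getElem_inj_iff.mp hkeq) (by omega)

-- int(str(a+1) + str(b+1)) for digit indices
lemma pv_concat_val (a b : Nat) (ha : a < 9) (hb : b < 9) :
    (PySem.Int.ofChars? (PySem.Int.toChars ((a : Int) + 1) ++ PySem.Int.toChars ((b : Int) + 1))).getD 0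
      = ((a : Int) + 1) * 10 + ((b : Int) + 1) := by
  interval_cases a <;> interval_cases b <;> decide

-- the inner filterMap of port B (proof-side name for its literal body)
def pvInner (line : String) (i : Int) : List Int :=
  (PySem.List.enumerate pvWords 1).filterMap (fun vw =>
    if PySem.List.slice line.toList (some i) (some (i + PySem.Str.len vw.2)) = vw.2.toList
    then some vw.1 else none)

lemma pv_cond_iff (l : List Char) (k : Nat) (w : String) :
    (PySem.List.slice l (some (k : Int)) (some ((k : Int) + PySem.Str.len w)) = w.toList)
      ↔ w.toList <+: l.drop k := by
  rw [PySem.Str.len_eq, PySem.List.slice_natCast_add]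
  rw [List.prefix_iff_eq_take]
  constructor
  · intro h; exact h.symm
  · intro h; exact h.symm

-- head of sorted(items, key=snd)
lemma pv_sorted_head {items : List (String × Int)} (hne : items ≠ []) :
    ∃ m t, PySem.List.sorted items (fun it => it.2) false = m :: t
      ∧ m ∈ items ∧ ∀ y ∈ items, m.2 ≤ y.2 := by
  cases h : PySem.List.sorted items (fun it => it.2) false with
  | nil => rw [PySem.List.sorted_eq_nil_iff] at h; exact absurd h hne
  | cons m t =>
    refine ⟨m, t, rfl, ?_, PySem.List.key_head_sorted_le _ _ h⟩
    exact (PySem.List.sorted_perm items (fun it => it.2) false).subset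
      (by rw [h]; exact List.mem_cons_self)

lemma pv_words_eq : pvWords = pvSpelled := rfl

lemma pv_enumerate_nodup : (PySem.List.enumerate pvSpelled 1).Nodup :=
  (PySem.List.pairwise_lt_enumerate pvSpelled 1).imp (fun h heq => by rw [heq] at h; exact lt_irrefl _ h)

lemma pv_spelled_nodup : pvSpelled.Nodup := by decide

lemma pv_revWord_injective : Function.Injective pvRevWord := by
  intro a b h
  apply String.toList_inj.mp
  have h2 := congrArg String.toList h
  rw [pv_revWord_toList, pv_revWord_toList] at h2
  exact List.reverse_injective h2

lemma pv_revmap_nodup : (pvSpelled.map pvRevWord).Nodup :=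
  pv_spelled_nodup.map pv_revWord_injective

lemma pv_spelled_len : pvSpelled.length = 9 := rfl

-- the singleton content of the inner filterMap at a matching position
lemma pv_inner_single (line : String) (k j : Nat) (hj : j < 9)
    (hm : (pvSpelled[j]'(by rw [pv_spelled_len]; exact hj)).toList <+: line.toList.drop k) :
    pvInner line (k : Int) = [(j : Int) + 1] := by
  have hx : ((1 : Int) + (j : Int), pvSpelled[j]'(by rw [pv_spelled_len]; exact hj))
      ∈ PySem.List.enumerate pvSpelled 1 := by
    rw [PySem.List.mem_enumerate_iff]
    exact ⟨j, by rw [pv_spelled_len]; exact hj, rfl⟩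
  have h := pv_filterMap_single (PySem.List.enumerate pvSpelled 1)
    (fun vw => PySem.List.slice line.toList (some (k : Int)) (some ((k : Int) + PySem.Str.len vw.2)) = vw.2.toList)
    Prod.fst ((1 : Int) + (j : Int), pvSpelled[j]'(by rw [pv_spelled_len]; exact hj)) hx
    (by exact (pv_cond_iff line.toList k _).mpr hm)
    ?_ pv_enumerate_nodup
  · rw [pvInner, pv_words_eq, h]
    norm_num [add_comm]
  · intro y hy hcond
    rw [PySem.List.mem_enumerate_iff] at hy
    obtain ⟨k', hk', rfl⟩ := hy
    have hm' : (pvSpelled[k']).toList <+: line.toList.drop k := (pv_cond_iff line.toList k _).mp hcond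
    have heq : (pvSpelled[k']).toList = (pvSpelled[j]'(by rw [pv_spelled_len]; exact hj)).toList :=
      pv_unique (List.mem_map_of_mem (List.getElem_mem _))
        (List.mem_map_of_mem (List.getElem_mem _)) hm' hm
    have : k' = j := pv_spelled_nodup.getElem_inj_iff.mp (String.toList_inj.mp heq)
    subst this
    rfl

lemma pv_inner_nil (line : String) (k : Nat)
    (hk : ¬ ∃ w ∈ pvWc, w <+: line.toList.drop k) :
    pvInner line (k : Int) = [] := by
  rw [pvInner, pv_words_eq]
  apply pv_filterMap_nil
  intro vw hvw hcond
  rw [PySem.List.mem_enumerate_iff] at hvw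
  obtain ⟨k', hk', rfl⟩ := hvw
  exact hk ⟨(pvSpelled[k']).toList, List.mem_map_of_mem (List.getElem_mem _),
    (pv_cond_iff line.toList k _).mp hcond⟩

-- ===== VERDICT (by name: the statement is the Claim_ definition above) =====
set_option maxHeartbeats 1600000 in
theorem GetModCalibVals_spec : Claim_equal_GetModCalibVals := by
  intro line _hdom hpre
  unfold Spec_GetModCalibVals
  obtain ⟨w₀, hw₀mem, hw₀in⟩ := hpre
  have hnodup : pvSpelled.Nodup := pv_spelled_nodup
  -- existence of an occurrence
  have hocc₀ : ∃ j, w₀.toList <+: line.toList.drop j := by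
    rw [PySem.Chars.exists_prefix_drop_iff_isIn]
    rw [PySem.Str.isIn_eq] at hw₀in
    exact hw₀in
  obtain ⟨k₀', hk₀'⟩ := hocc₀
  have hPex : ∃ k, ∃ w ∈ pvWc, w <+: line.toList.drop k :=
    ⟨k₀', w₀.toList, List.mem_map_of_mem hw₀mem, hk₀'⟩
  have hPbound : ∀ k, (∃ w ∈ pvWc, w <+: line.toList.drop k) → k < line.toList.length := by
    rintro k ⟨w, hwmem, hwp⟩
    have h3 := (pv_len_wc w hwmem).1
    have h4 := hwp.length_le
    rw [List.length_drop] at h4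
    omega
  -- first and last matching positions
  set i₀ := Nat.find hPex with hi₀def
  have hPi₀ : ∃ w ∈ pvWc, w <+: line.toList.drop i₀ := Nat.find_spec hPex
  have hmin : ∀ m, m < i₀ → ¬ ∃ w ∈ pvWc, w <+: line.toList.drop m :=
    fun m hm => Nat.find_min hPex hm
  set i₁ := Nat.findGreatest (fun k => ∃ w ∈ pvWc, w <+: line.toList.drop k) line.toList.length with hi₁def
  obtain ⟨k₀, hk₀⟩ := id hPex
  have hPi₁ : ∃ w ∈ pvWc, w <+: line.toList.drop i₁ := by
    have h := Nat.findGreatest_spec (P := fun k => ∃ w ∈ pvWc, w <+: line.toList.drop k)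
      (le_of_lt (hPbound k₀ hk₀)) hk₀
    rw [← hi₁def] at h
    exact h
  have hmax : ∀ m, i₁ < m → m < line.toList.length → ¬ ∃ w ∈ pvWc, w <+: line.toList.drop m := by
    intro m hm1 hm2
    rw [hi₁def] at hm1
    exact Nat.findGreatest_is_greatest hm1 (le_of_lt hm2)
  have hi₀n : i₀ < line.toList.length := hPbound i₀ hPi₀
  have hi₁n : i₁ < line.toList.length := hPbound i₁ hPi₁
  -- the words at those positions
  obtain ⟨wA0, hwA0mem, hwA0p⟩ := hPi₀
  obtain ⟨sA0, hsA0mem, hsA0eq⟩ := List.mem_map.mp hwA0mem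
  obtain ⟨j₀, hj₀lt, hj₀eq⟩ := List.mem_iff_getElem.mp hsA0mem
  have hj₀9 : j₀ < 9 := by rw [pv_spelled_len] at hj₀lt; exact hj₀lt
  have hj₀p : (pvSpelled[j₀]'hj₀lt).toList <+: line.toList.drop i₀ := by
    rw [hj₀eq, hsA0eq]; exact hwA0p
  obtain ⟨wB0, hwB0mem, hwB0p⟩ := hPi₁
  obtain ⟨sB0, hsB0mem, hsB0eq⟩ := List.mem_map.mp hwB0mem
  obtain ⟨j₁, hj₁lt, hj₁eq⟩ := List.mem_iff_getElem.mp hsB0mem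
  have hj₁9 : j₁ < 9 := by rw [pv_spelled_len] at hj₁lt; exact hj₁lt
  have hj₁p : (pvSpelled[j₁]'hj₁lt).toList <+: line.toList.drop i₁ := by
    rw [hj₁eq, hsB0eq]; exact hwB0p
  -- ===== B side =====
  have hdig : pvDigits line = (List.range line.toList.length).flatMap (fun (k : Nat) => pvInner line (k : Int)) := by
    rw [pvDigits, PySem.Str.len_eq line, PySem.List.pyRange_zero_natCast, List.flatMap_map]
    rfl
  have hdhead : (pvDigits line).head? = some ((j₀ : Int) + 1) := by
    rw [hdig]
    exact pv_flat_head hi₀n (fun k hk => pv_inner_nil line k (hmin k hk))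
      (pv_inner_single line i₀ j₀ hj₀9 hj₀p)
  have hdlast : (pvDigits line).getLast? = some ((j₁ : Int) + 1) := by
    rw [hdig]
    exact pv_flat_last hi₁n (fun k hk1 hk2 => pv_inner_nil line k (hmax k hk1 hk2))
      (pv_inner_single line i₁ j₁ hj₁9 hj₁p)
  have hb0 : PySem.List.pyGet? (pvDigits line) 0 = some ((j₀ : Int) + 1) := by
    rw [PySem.List.pyGet?_zero, ← List.head?_eq_getElem?, hdhead]
  have hbl : PySem.List.pyGet? (pvDigits line) (-1) = some ((j₁ : Int) + 1) := by
    rw [PySem.List.pyGet?_neg_one, hdlast]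
  have hwne : ∀ w ∈ pvWc, w ≠ [] := by
    intro w hw h
    have h3 := (pv_len_wc w hw).1
    rw [h] at h3
    simp at h3
  -- ===== A side: forward dict =====
  have hitems1 : (pvNumPos line).items
      = (pvSpelled.filter (fun w => decide (PySem.Str.find line w ≠ -1))).map
          (fun w => (w, PySem.Str.find line w)) := by
    have h := pv_items_foldl_if (p := fun w => PySem.Str.find line w ≠ -1)
      (key := fun w => w) (val := fun w => PySem.Str.find line w)
      (f := fun d spelled =>
        if PySem.Str.find line spelled ≠ -1 then d.insert spelled (PySem.Str.find line spelled) else d)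
      (fun d w => rfl) pvSpelled PySem.Dict.empty
      (fun w _ => PySem.Dict.contains_empty w) (by simpa using pv_spelled_nodup)
    rw [pvNumPos, h, show PySem.Dict.empty.items = ([] : List (String × Int)) from rfl]
    simp
  have hw₀find : PySem.Str.find line w₀ ≠ -1 := by
    rw [PySem.Str.find_ne_neg_one_iff]
    rw [PySem.Str.isIn_eq] at hw₀in
    exact (PySem.Chars.isIn_iff_infix _ _).mp hw₀in
  have hne1 : (pvNumPos line).items ≠ [] := by
    rw [hitems1]
    exact List.ne_nil_of_mem
      (List.mem_map_of_mem (List.mem_filter.mpr ⟨hw₀mem, by simpa using hw₀find⟩))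
  obtain ⟨m1, t1, hsort1, hm1mem, hm1min⟩ := pv_sorted_head hne1
  obtain ⟨wA, hwAfilt, hmEq1⟩ := List.mem_map.mp (hitems1 ▸ hm1mem)
  have hwAmem : wA ∈ pvSpelled := (List.mem_filter.mp hwAfilt).1
  have hwAfind : PySem.Str.find line wA ≠ -1 := by
    have h := (List.mem_filter.mp hwAfilt).2
    simpa using h
  have hkey1 : PySem.List.pyGet? (pvSortedNumPos line).keys 0 = some wA := by
    rw [pvSortedNumPos, hsort1, pv_keys_head, ← hmEq1]
  -- wA is the word of the first match
  have hFA0 : 0 ≤ PySem.Chars.find line.toList wA.toList := by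
    rw [PySem.Str.find_eq] at hwAfind
    have h := PySem.Chars.neg_one_le_find line.toList wA.toList
    omega
  have hspecA := PySem.Chars.find_spec hFA0
  have hi₀le : i₀ ≤ (PySem.Chars.find line.toList wA.toList).toNat := by
    rw [hi₀def]
    exact Nat.find_min' hPex ⟨wA.toList, List.mem_map_of_mem hwAmem, hspecA.1⟩
  have hstar := pv_find_le hj₀p
  have hstar_ne : PySem.Str.find line (pvSpelled[j₀]'hj₀lt) ≠ -1 := by
    rw [PySem.Str.find_eq]; omega
  have hm1le : m1.2 ≤ PySem.Str.find line (pvSpelled[j₀]'hj₀lt) :=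
    hm1min ((pvSpelled[j₀]'hj₀lt), PySem.Str.find line (pvSpelled[j₀]'hj₀lt))
      (by rw [hitems1]
          exact List.mem_map_of_mem (List.mem_filter.mpr ⟨List.getElem_mem _, by simpa using hstar_ne⟩))
  have hm1snd : m1.2 = PySem.Str.find line wA := by rw [← hmEq1]
  have hFAi₀ : PySem.Chars.find line.toList wA.toList = (i₀ : Int) := by
    rw [PySem.Str.find_eq] at hm1le hm1snd
    omega
  have hwAp : wA.toList <+: line.toList.drop i₀ := by
    have h := hspecA.1
    rw [hFAi₀] at h
    simpa using h
  have hwAeq : wA = pvSpelled[j₀]'hj₀lt :=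
    String.toList_inj.mp (pv_unique (List.mem_map_of_mem hwAmem)
      (List.mem_map_of_mem (List.getElem_mem _)) hwAp hj₀p)
  have hidx1 : PySem.List.index? pvSpelled wA = some j₀ := by
    rw [hwAeq]
    exact pv_index_of_getElem hj₀lt pv_spelled_nodup
  -- ===== A side: reversed dict =====
  have hGdef : ∀ w : String, PySem.Str.find (pvRevLine line) (pvRevWord w)
      = PySem.Chars.find line.toList.reverse w.toList.reverse := by
    intro w
    rw [PySem.Str.find_eq, pv_revLine_toList, pv_revWord_toList]
  have hitems2 : (pvNumPosRev line).items
      = (pvSpelled.filter (fun w => decide (PySem.Str.find (pvRevLine line) (pvRevWord w) ≠ -1))).map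
          (fun w => (pvRevWord w, PySem.Str.find (pvRevLine line) (pvRevWord w))) := by
    have h := pv_items_foldl_if (p := fun w => PySem.Str.find (pvRevLine line) (pvRevWord w) ≠ -1)
      (key := pvRevWord) (val := fun w => PySem.Str.find (pvRevLine line) (pvRevWord w))
      (f := fun d spelled =>
        if PySem.Str.find (pvRevLine line) (pvRevWord spelled) ≠ -1 then
          d.insert (pvRevWord spelled) (PySem.Str.find (pvRevLine line) (pvRevWord spelled))
        else d)
      (fun d w => rfl) pvSpelled PySem.Dict.empty
      (fun w _ => PySem.Dict.contains_empty _) pv_revmap_nodup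
    rw [pvNumPosRev, h, show PySem.Dict.empty.items = ([] : List (String × Int)) from rfl]
    simp
  have hw₀ne : w₀.toList ≠ [] := hwne _ (List.mem_map_of_mem hw₀mem)
  have hrev₀ := pv_rev_match_of_match hw₀ne hk₀'
  have hG₀ : PySem.Str.find (pvRevLine line) (pvRevWord w₀) ≠ -1 := by
    rw [hGdef]
    have h := (pv_find_le hrev₀.2).1
    omega
  have hne2 : (pvNumPosRev line).items ≠ [] := by
    rw [hitems2]
    exact List.ne_nil_of_mem
      (List.mem_map_of_mem (List.mem_filter.mpr ⟨hw₀mem, by simpa using hG₀⟩))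
  obtain ⟨m2, t2, hsort2, hm2mem, hm2min⟩ := pv_sorted_head hne2
  obtain ⟨wB, hwBfilt, hmEq2⟩ := List.mem_map.mp (hitems2 ▸ hm2mem)
  have hwBmem : wB ∈ pvSpelled := (List.mem_filter.mp hwBfilt).1
  have hwBfind : PySem.Str.find (pvRevLine line) (pvRevWord wB) ≠ -1 := by
    have h := (List.mem_filter.mp hwBfilt).2
    simpa using h
  have hkey2 : PySem.List.pyGet? (pvSortedNumPosRev line).keys 0 = some (pvRevWord wB) := by
    rw [pvSortedNumPosRev, hsort2, pv_keys_head, ← hmEq2]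
  have hGB0 : 0 ≤ PySem.Chars.find line.toList.reverse wB.toList.reverse := by
    rw [hGdef] at hwBfind
    have h := PySem.Chars.neg_one_le_find line.toList.reverse wB.toList.reverse
    omega
  have hspecB := PySem.Chars.find_spec hGB0
  have hwBne : wB.toList ≠ [] := hwne _ (List.mem_map_of_mem hwBmem)
  have hmatchB := pv_match_of_rev_match hwBne hspecB.1
  have hjBi₁ : line.toList.length - (PySem.Chars.find line.toList.reverse wB.toList.reverse).toNat
      - wB.toList.length ≤ i₁ := by
    rw [hi₁def]
    exact Nat.le_findGreatest (by omega)
      ⟨wB.toList, List.mem_map_of_mem hwBmem, hmatchB.2⟩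
  have hj₁ne : (pvSpelled[j₁]'hj₁lt).toList ≠ [] := hwne _ (List.mem_map_of_mem (List.getElem_mem _))
  have hrev₁ := pv_rev_match_of_match hj₁ne hj₁p
  have hG₁ := pv_find_le hrev₁.2
  have hG₁ne : PySem.Str.find (pvRevLine line) (pvRevWord (pvSpelled[j₁]'hj₁lt)) ≠ -1 := by
    rw [hGdef]
    omega
  have hm2le : m2.2 ≤ PySem.Str.find (pvRevLine line) (pvRevWord (pvSpelled[j₁]'hj₁lt)) :=
    hm2min (pvRevWord (pvSpelled[j₁]'hj₁lt), PySem.Str.find (pvRevLine line) (pvRevWord (pvSpelled[j₁]'hj₁lt)))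
      (by rw [hitems2]
          exact List.mem_map_of_mem (List.mem_filter.mpr ⟨List.getElem_mem _, by simpa using hG₁ne⟩))
  have hm2snd : m2.2 = PySem.Str.find (pvRevLine line) (pvRevWord wB) := by rw [← hmEq2]
  have hjBeq : line.toList.length - (PySem.Chars.find line.toList.reverse wB.toList.reverse).toNat
      - wB.toList.length = i₁ := by
    by_contra hneq
    have hjlt : line.toList.length - (PySem.Chars.find line.toList.reverse wB.toList.reverse).toNat
        - wB.toList.length < i₁ := by omega
    have hend := pv_ends_lt (List.mem_map_of_mem hwBmem)
      (List.mem_map_of_mem (List.getElem_mem _)) hmatchB.2 hj₁p hjlt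
    rw [hGdef] at hm2snd hm2le
    have h1 := hmatchB.1
    have h2 := hrev₁.1
    have h3 := hG₁.2
    omega
  have hwBp : wB.toList <+: line.toList.drop i₁ := by
    rw [← hjBeq]
    exact hmatchB.2
  have hwBeq : wB = pvSpelled[j₁]'hj₁lt :=
    String.toList_inj.mp (pv_unique (List.mem_map_of_mem hwBmem)
      (List.mem_map_of_mem (List.getElem_mem _)) hwBp hj₁p)
  have hidx2 : PySem.List.index? pvSpelled (pvRevWord (pvRevWord wB)) = some j₁ := by
    rw [pv_revWord_revWord, hwBeq]
    exact pv_index_of_getElem hj₁lt pv_spelled_nodup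
  -- ===== combine =====
  simp only [GetModCalibVals, GetModCalibVals_alt, hkey1, hkey2, hidx1, hidx2, hb0, hbl]
  rw [pv_concat_val j₀ j₁ hj₀9 hj₁9]
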